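-- pv_equiv track=rewrite | github.com/DanielCondeTorres/Quantum_sequence_helix | Code/utils/general_utils.py | _codes_to_bitstring
-- ===== SOURCE A (Python) =====
-- def get_qubit_index(position: int, bit_idx: int, bits_per_pos: int) -> int:
--     """Convert (position, bit_index) to qubit index under binary encoding"""
--     return position * bits_per_pos + bit_idx
--
-- def _codes_to_bitstring(codes: list[int], L: int, bits_per_pos: int, n_aa: int) -> str:
--     """
--     Converts a list of integer codes to a single binary bitstring.
--     """
--     bits = ['0'] * (L * bits_per_pos)
--     for i, code in enumerate(codes):
--         code = max(0, min(n_aa - 1, int(code)))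
--         for k in range(bits_per_pos):
--             q = get_qubit_index(i, k, bits_per_pos)
--             bits[q] = '1' if ((code >> k) & 1) else '0'
--     return ''.join(bits)
-- ===== SOURCE B (Python) =====
-- def _codes_to_bitstring(codes: list[int], L: int, bits_per_pos: int, n_aa: int) -> str:
--     """
--     Converts a list of integer codes to a single binary bitstring.
--     (Chunk-concatenation form: per code, one little-endian fixed-width chunk.)
--     """
--     if bits_per_pos <= 0:
--         return ''
--     mask = (1 << bits_per_pos) - 1
--     chunks = []
--     for c in codes:
--         c = max(0, min(n_aa - 1, int(c)))
--         chunks.append(format(c & mask, f'0{bits_per_pos}b')[::-1])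
--     chunks.append('0' * ((L - len(codes)) * bits_per_pos))
--     return ''.join(chunks)
-- ===== Notes on version B (the rewrite author's own statement) =====
-- stated objective: idiomatic
-- what changed: B drops the preallocated bit array and the get_qubit_index scatter helper: it builds, per code, one little-endian fixed-width binary chunk via format() and concatenates the chunks plus a trailing zero pad, instead of writing single bits into an indexed list.
-- intended difference: On inputs with bits_per_pos < 0 and L < 0, A returns a positive-length all-zero string (the doubly-negative product L*bits_per_pos makes its dead preallocation nonempty) while B returns '', the intended value since a non-positive bit width encodes nothing. — e.g. on _codes_to_bitstring([], -1, -1, 4): A returns "0", B returns ""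
import Mathlib
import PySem

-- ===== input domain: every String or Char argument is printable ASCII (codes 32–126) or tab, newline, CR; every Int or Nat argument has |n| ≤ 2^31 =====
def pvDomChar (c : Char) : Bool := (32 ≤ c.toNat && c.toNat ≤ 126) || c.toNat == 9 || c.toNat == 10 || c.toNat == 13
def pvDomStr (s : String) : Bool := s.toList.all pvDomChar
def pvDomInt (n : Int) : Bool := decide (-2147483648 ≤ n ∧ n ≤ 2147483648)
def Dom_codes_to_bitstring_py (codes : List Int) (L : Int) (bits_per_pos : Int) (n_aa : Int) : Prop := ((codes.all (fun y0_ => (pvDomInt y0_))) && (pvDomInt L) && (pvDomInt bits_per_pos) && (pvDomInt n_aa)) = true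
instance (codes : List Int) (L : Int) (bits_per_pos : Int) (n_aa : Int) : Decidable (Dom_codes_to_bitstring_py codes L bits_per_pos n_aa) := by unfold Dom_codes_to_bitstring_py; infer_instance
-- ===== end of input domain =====

-- B rebuilds the bitstring as one little-endian fixed-width chunk per code, concatenated,
-- instead of scattering single bits into a preallocated array (objective: idiomatic/simpler).
-- On the nonsense corner bits_per_pos < 0 ∧ L < 0 A returns a leftover all-zero string; B returns "" (see D_ below).

-- ===== PORT A =====
def get_qubit_index (position : Int) (bit_idx : Int) (bits_per_pos : Int) : Int :=
  position * bits_per_pos + bit_idx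

def codes_to_bitstring_py (codes : List Int) (L : Int) (bits_per_pos : Int) (n_aa : Int) : String :=
  -- bits = ['0'] * (L * bits_per_pos)   (negative repeat count = empty list, as in Python)
  let bits : List Char := List.replicate (L * bits_per_pos).toNat '0'
  let bits :=
    (PySem.List.enumerate codes 0).foldl (fun bits ic =>
      let code := max 0 (min (n_aa - 1) ic.2)
      (PySem.List.pyRange 0 bits_per_pos 1).foldl (fun bits k =>
        let q := get_qubit_index ic.1 k bits_per_pos
        -- bits[q] = … : exact under Pre_ (0 ≤ q < len bits there; out of range Python raises IndexError)
        bits.set q.toNat (if Int.land (code >>> k.toNat) 1 != 0 then '1' else '0')) bits) bits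
  String.ofList bits  -- ''.join(bits), bits being single characters

-- ===== PORT B =====
-- pvBinDigits n: the binary digits of n, most significant first ([] for 0)
def pvBinDigits (n : Nat) : List Char :=
  if h : n = 0 then [] else pvBinDigits (n / 2) ++ [if n % 2 = 1 then '1' else '0']
decreasing_by exact Nat.div_lt_self (Nat.pos_of_ne_zero h) one_lt_two

-- format(n, f'0{w}b') : zero-padded big-endian binary of width w
def pvFormatBin (n w : Nat) : List Char :=
  let d := if n = 0 then ['0'] else pvBinDigits n
  List.replicate (w - d.length) '0' ++ d

def codes_to_bitstring_py_alt (codes : List Int) (L : Int) (bits_per_pos : Int) (n_aa : Int) : String :=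
  if bits_per_pos ≤ 0 then "" else
    let w := bits_per_pos.toNat
    let mask := (1 <<< w) - 1
    let chunks := codes.map (fun c =>
      let c := max 0 (min (n_aa - 1) c)
      -- c ≥ 0 after the clamp, so c.toNat is exact; [::-1] is List.reverse
      (pvFormatBin (c.toNat &&& mask) w).reverse)
    let pad := List.replicate ((L - codes.length) * bits_per_pos).toNat '0'
    -- ''.join(chunks) = concatenation
    String.ofList ((chunks ++ [pad]).flatten)

-- ===== PRECONDITION & SPEC =====
-- Pre_ excludes exactly the inputs where A raises IndexError: more codes than L encoded positions
-- (with a positive bit width), so a write lands past the preallocated list.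
def Pre_codes_to_bitstring_py (codes : List Int) (L : Int) (bits_per_pos : Int) (n_aa : Int) : Prop :=
  bits_per_pos ≤ 0 ∨ codes = [] ∨ (codes.length : Int) ≤ L
instance (codes : List Int) (L : Int) (bits_per_pos : Int) (n_aa : Int) : Decidable (Pre_codes_to_bitstring_py codes L bits_per_pos n_aa) := by unfold Pre_codes_to_bitstring_py; infer_instance

def pvWitness_codes_to_bitstring_py : List Int × Int × Int × Int := ([1, 2, 0], 4, 2, 4)

-- On bits_per_pos < 0 with L < 0, A returns a positive-length all-zero string (the doubly-negative
-- product L*bits_per_pos makes its dead preallocation nonempty), while B returns '' — the intended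
-- value, since a non-positive bit width encodes nothing.
def D_codes_to_bitstring_py (codes : List Int) (L : Int) (bits_per_pos : Int) (n_aa : Int) : Prop :=
  bits_per_pos < 0 ∧ L < 0
instance (codes : List Int) (L : Int) (bits_per_pos : Int) (n_aa : Int) : Decidable (D_codes_to_bitstring_py codes L bits_per_pos n_aa) := by unfold D_codes_to_bitstring_py; infer_instance

def Spec_codes_to_bitstring_py (codes : List Int) (L : Int) (bits_per_pos : Int) (n_aa : Int) (out : String) : Prop := ¬ D_codes_to_bitstring_py codes L bits_per_pos n_aa → out = codes_to_bitstring_py_alt codes L bits_per_pos n_aa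
instance (codes : List Int) (L : Int) (bits_per_pos : Int) (n_aa : Int) (out : String) : Decidable (Spec_codes_to_bitstring_py codes L bits_per_pos n_aa out) := by unfold Spec_codes_to_bitstring_py; infer_instance

def pvDiffWitness_codes_to_bitstring_py : List Int × Int × Int × Int := ([], -1, -1, 4)
def pvDiffWitnessOut_codes_to_bitstring_py : String × String := ("0", "")

-- ===== CLAIM (what is proved, stated in full; the proofs are below) =====
def Claim_unchanged_codes_to_bitstring_py : Prop := ∀ (codes : List Int) (L : Int) (bits_per_pos : Int) (n_aa : Int), Dom_codes_to_bitstring_py codes L bits_per_pos n_aa → Pre_codes_to_bitstring_py codes L bits_per_pos n_aa → Spec_codes_to_bitstring_py codes L bits_per_pos n_aa (codes_to_bitstring_py codes L bits_per_pos n_aa)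
def Claim_changed_codes_to_bitstring_py : Prop := Dom_codes_to_bitstring_py (pvDiffWitness_codes_to_bitstring_py.1) (pvDiffWitness_codes_to_bitstring_py.2.1) (pvDiffWitness_codes_to_bitstring_py.2.2.1) (pvDiffWitness_codes_to_bitstring_py.2.2.2) ∧ Pre_codes_to_bitstring_py (pvDiffWitness_codes_to_bitstring_py.1) (pvDiffWitness_codes_to_bitstring_py.2.1) (pvDiffWitness_codes_to_bitstring_py.2.2.1) (pvDiffWitness_codes_to_bitstring_py.2.2.2) ∧ D_codes_to_bitstring_py (pvDiffWitness_codes_to_bitstring_py.1) (pvDiffWitness_codes_to_bitstring_py.2.1) (pvDiffWitness_codes_to_bitstring_py.2.2.1) (pvDiffWitness_codes_to_bitstring_py.2.2.2) ∧ codes_to_bitstring_py (pvDiffWitness_codes_to_bitstring_py.1) (pvDiffWitness_codes_to_bitstring_py.2.1) (pvDiffWitness_codes_to_bitstring_py.2.2.1) (pvDiffWitness_codes_to_bitstring_py.2.2.2) = pvDiffWitnessOut_codes_to_bitstring_py.1 ∧ codes_to_bitstring_py_alt (pvDiffWitness_codes_to_bitstring_py.1) (pvDiffWitness_codes_to_bitstring_py.2.1)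 (pvDiffWitness_codes_to_bitstring_py.2.2.1) (pvDiffWitness_codes_to_bitstring_py.2.2.2) = pvDiffWitnessOut_codes_to_bitstring_py.2 ∧ pvDiffWitnessOut_codes_to_bitstring_py.1 ≠ pvDiffWitnessOut_codes_to_bitstring_py.2
def Claim_exact_codes_to_bitstring_py : Prop := ∀ (codes : List Int) (L : Int) (bits_per_pos : Int) (n_aa : Int), Dom_codes_to_bitstring_py codes L bits_per_pos n_aa → Pre_codes_to_bitstring_py codes L bits_per_pos n_aa → D_codes_to_bitstring_py codes L bits_per_pos n_aa → codes_to_bitstring_py codes L bits_per_pos n_aa ≠ codes_to_bitstring_py_alt codes L bits_per_pos n_aa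

-- ===== LEMMAS AND PROOFS =====

-- proof-side abbreviations
def pvBit (n k : Nat) : Char := if n.testBit k then '1' else '0'

def pvChunkS (W : Nat) (code : Int) : List Char :=
  (List.range W).map (fun (kn : Nat) => if Int.land (code >>> kn) 1 != 0 then '1' else '0')

theorem pv_foldl_id {α β : Type} (l : List β) (b : α) : l.foldl (fun x _ => x) b = b := by
  induction l generalizing b with
  | nil => rfl
  | cons x xs ih => simpa using ih b

theorem pv_set_append (pre : List Char) (r : Char) (rest : List Char) (v : Char) :
    (pre ++ r :: rest).set pre.length v = pre ++ v :: rest := by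
  induction pre with
  | nil => rfl
  | cons a pre ih => simpa using ih

theorem pv_scatter : ∀ (m : Nat) (f : Nat → Char) (pre rest : List Char), m ≤ rest.length →
    (List.range m).foldl (fun b k => b.set (pre.length + k) (f k)) (pre ++ rest)
    = pre ++ ((List.range m).map f ++ rest.drop m)
  | 0, f, pre, rest, _ => by simp
  | (m+1), f, pre, rest, h => by
      cases rest with
      | nil => simp at h
      | cons r rest' =>
        rw [List.range_succ_eq_map]
        simp only [List.foldl_cons, List.foldl_map]
        have hset : (pre ++ r :: rest').set (pre.length + 0) (f 0) = (pre ++ [f 0]) ++ rest' := by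
          simpa using pv_set_append pre r rest' (f 0)
        rw [hset]
        have hfun : (fun (b : List Char) (k : Nat) => b.set (pre.length + k.succ) (f k.succ))
            = (fun (b : List Char) (k : Nat) => b.set ((pre ++ [f 0]).length + k) ((fun k => f (k+1)) k)) := by
          funext b k
          simp only [List.length_append, List.length_cons, List.length_nil, Nat.succ_eq_add_one]
          congr 1
          omega
        rw [hfun, pv_scatter m (fun k => f (k+1)) (pre ++ [f 0]) rest' (by simpa using h)]
        simp [Nat.succ_eq_add_one]

theorem pv_bit_char (m k : Nat) :
    (if Int.land ((m : Int) >>> k) 1 != 0 then '1' else '0') = pvBit m k := by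
  have h1 : Int.land ((m : Int) >>> k) 1 = (((m >>> k) &&& 1 : Nat) : Int) := rfl
  have h2 : m.testBit k = ((m >>> k) &&& 1 != 0) := by
    simp [Nat.testBit, Nat.and_comm]
  have h3 : ((((m >>> k) &&& 1 : Nat) : Int) != 0) = (((m >>> k) &&& 1) != 0) := by
    rw [Bool.eq_iff_iff]
    simp only [bne_iff_ne, ne_eq, Int.natCast_eq_zero]
  rw [h1, h3, ← h2]
  simp [pvBit]

theorem pv_digits : ∀ (W : Nat) (n : Nat), 0 < n → n < 2 ^ W →
    (pvBinDigits n).reverse ++ List.replicate (W - (pvBinDigits n).length) '0'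
    = (List.range W).map (fun k => pvBit n k)
  | 0, n, hn, hlt => by simp at hlt; omega
  | (W+1), n, hn, hlt => by
      have hn0 : n ≠ 0 := Nat.pos_iff_ne_zero.mp hn
      rw [pvBinDigits, dif_neg hn0]
      rw [List.range_succ_eq_map, List.map_cons, List.map_map]
      have hbit0 : pvBit n 0 = (if n % 2 = 1 then '1' else '0') := by
        simp [pvBit, Nat.testBit_zero]
      have htail : (List.range W).map (fun k => pvBit n k.succ)
          = (List.range W).map (fun k => pvBit (n / 2) k) := by
        apply List.map_congr_left
        intro k _
        simp [pvBit, Nat.testBit_succ]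
      simp only [Function.comp_def]
      rw [htail]
      by_cases h2 : n / 2 = 0
      · rw [h2]
        rw [pvBinDigits, dif_pos rfl]
        have hz : (List.range W).map (fun k => pvBit 0 k) = List.replicate W '0' := by
          simp [pvBit, Nat.zero_testBit, List.map_const']
        simp [hz, hbit0]
      · have hlt2 : n / 2 < 2 ^ W := by
          have h := Nat.pow_succ 2 W
          omega
        have ih := pv_digits W (n / 2) (Nat.pos_iff_ne_zero.mpr h2) hlt2
        rw [← ih]
        simp only [List.reverse_append, List.reverse_cons, List.reverse_nil, List.nil_append,
          List.length_append, List.length_cons, List.length_nil]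
        rw [hbit0]
        simp [List.cons_append]

theorem pv_fb (W n : Nat) (hn : n < 2 ^ W) (hw : 0 < W) :
    (pvFormatBin n W).reverse = (List.range W).map (fun k => pvBit n k) := by
  by_cases h0 : n = 0
  · subst h0
    obtain ⟨W', rfl⟩ : ∃ W', W = W' + 1 := ⟨W - 1, by omega⟩
    simp only [pvFormatBin, if_pos rfl]
    rw [List.reverse_append, List.reverse_replicate]
    have hz : (List.range (W' + 1)).map (fun k => pvBit 0 k) = List.replicate (W' + 1) '0' := by
      simp [pvBit, Nat.zero_testBit, List.map_const']
    rw [hz]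
    simp [List.replicate_succ]
  · simp only [pvFormatBin, if_neg h0]
    rw [List.reverse_append, List.reverse_replicate]
    exact pv_digits W n (Nat.pos_iff_ne_zero.mpr h0) hn

theorem pv_chunk_eq (W : Nat) (c : Int) (hw : 0 < W) (hc : 0 ≤ c) :
    (pvFormatBin (c.toNat &&& ((1 <<< W) - 1)) W).reverse = pvChunkS W c := by
  have hmask : c.toNat &&& ((1 <<< W) - 1) = c.toNat % 2 ^ W := by
    rw [Nat.shiftLeft_eq, one_mul, Nat.and_two_pow_sub_one_eq_mod]
  rw [hmask, pv_fb W _ (Nat.mod_lt _ (by positivity)) hw]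
  unfold pvChunkS
  apply List.map_congr_left
  intro k hk
  have hkW : k < W := List.mem_range.mp hk
  have hcast : c = ((c.toNat : Nat) : Int) := (Int.toNat_of_nonneg hc).symm
  rw [hcast, pv_bit_char, Int.toNat_natCast]
  simp [pvBit, Nat.testBit_mod_two_pow, hkW]

theorem pv_outer (bpp n_aa : Int) (hb : 0 < bpp) :
    ∀ (cs : List Int) (s : Nat) (pre : List Char) (r : Nat),
    pre.length = s * bpp.toNat → cs.length * bpp.toNat ≤ r →
    (PySem.List.enumerate cs (s : Int)).foldl
      (fun bits ic =>
        (PySem.List.pyRange 0 bpp 1).foldl (fun bits k =>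
          bits.set (get_qubit_index ic.1 k bpp).toNat
            (if Int.land ((max 0 (min (n_aa - 1) ic.2)) >>> k.toNat) 1 != 0 then '1' else '0')) bits)
      (pre ++ List.replicate r '0')
    = pre ++ ((cs.map (fun c => pvChunkS bpp.toNat (max 0 (min (n_aa - 1) c)))).flatten
        ++ List.replicate (r - cs.length * bpp.toNat) '0')
  | [], s, pre, r, hlen, hr => by
      simp [PySem.List.enumerate_nil]
  | (c :: cs), s, pre, r, hlen, hr => by
      have hbw : bpp = ((bpp.toNat : Nat) : Int) := (Int.toNat_of_nonneg hb.le).symm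
      have hr' : cs.length * bpp.toNat + bpp.toNat ≤ r := by
        simpa [Nat.succ_mul] using hr
      have hstep : (PySem.List.pyRange 0 bpp 1).foldl (fun bits k =>
            bits.set (get_qubit_index (s : Int) k bpp).toNat
              (if Int.land ((max 0 (min (n_aa - 1) c)) >>> k.toNat) 1 != 0 then '1' else '0'))
            (pre ++ List.replicate r '0')
          = (pre ++ pvChunkS bpp.toNat (max 0 (min (n_aa - 1) c))) ++ List.replicate (r - bpp.toNat) '0' := by
        rw [show PySem.List.pyRange 0 bpp 1 = List.map (fun (k : Nat) => (k : Int)) (List.range bpp.toNat) from by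
          conv_lhs => rw [hbw]
          exact PySem.List.pyRange_zero_natCast bpp.toNat]
        rw [List.foldl_map]
        have hfun : (fun (bits : List Char) (kn : Nat) =>
              bits.set (get_qubit_index (s : Int) ((kn : Nat) : Int) bpp).toNat
                (if Int.land ((max 0 (min (n_aa - 1) c)) >>> ((kn : Nat) : Int).toNat) 1 != 0 then '1' else '0'))
            = (fun (bits : List Char) (kn : Nat) =>
              bits.set (pre.length + kn)
                (if Int.land ((max 0 (min (n_aa - 1) c)) >>> kn) 1 != 0 then '1' else '0')) := by
          funext bits kn
          have hq : (get_qubit_index (s : Int) ((kn : Nat) : Int) bpp).toNat = pre.length + kn := by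
            rw [get_qubit_index, hlen]
            conv_lhs => rw [hbw, ← Int.natCast_mul, ← Int.natCast_add, Int.toNat_natCast]
          rw [hq]
          simp [Int.toNat_natCast]
        rw [hfun]
        rw [pv_scatter bpp.toNat
          (fun kn => if Int.land ((max 0 (min (n_aa - 1) c)) >>> kn) 1 != 0 then '1' else '0')
          pre (List.replicate r '0') (by simp; omega)]
        rw [List.drop_replicate]
        simp [pvChunkS, List.append_assoc]
      simp only [PySem.List.enumerate_cons, List.foldl_cons]
      rw [hstep]
      rw [show (s : Int) + 1 = ((s + 1 : Nat) : Int) from by push_cast; ring]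
      rw [pv_outer bpp n_aa hb cs (s + 1)
        (pre ++ pvChunkS bpp.toNat (max 0 (min (n_aa - 1) c)))
        (r - bpp.toNat)
        (by simp [hlen, pvChunkS, Nat.succ_mul])
        (by omega)]
      have hcnt : r - bpp.toNat - cs.length * bpp.toNat = r - (c :: cs).length * bpp.toNat := by
        simp only [List.length_cons, Nat.succ_mul]
        omega
      rw [hcnt]
      simp [List.append_assoc]

theorem pv_main : ∀ (codes : List Int) (L : Int) (bits_per_pos : Int) (n_aa : Int),
    Pre_codes_to_bitstring_py codes L bits_per_pos n_aa →
    ¬ D_codes_to_bitstring_py codes L bits_per_pos n_aa →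
    codes_to_bitstring_py codes L bits_per_pos n_aa = codes_to_bitstring_py_alt codes L bits_per_pos n_aa := by
  intro codes L bpp naa hpre hnd
  unfold Pre_codes_to_bitstring_py at hpre
  unfold D_codes_to_bitstring_py at hnd
  by_cases hb : bpp ≤ 0
  · have hrange : PySem.List.pyRange 0 bpp 1 = [] := PySem.List.pyRange_one_eq_nil hb
    have hle : L * bpp ≤ 0 := by
      rcases lt_or_eq_of_le hb with hlt | heq
      · have hL : 0 ≤ L := by
          by_contra hL
          exact hnd ⟨hlt, by omega⟩
        nlinarith
      · rw [heq]; simp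
    have hcnt : (L * bpp).toNat = 0 := by
      generalize L * bpp = t at hle ⊢
      omega
    simp [codes_to_bitstring_py, codes_to_bitstring_py_alt, hrange, hcnt, hb, pv_foldl_id]
  · push_neg at hb
    have hbw : bpp = ((bpp.toNat : Nat) : Int) := (Int.toNat_of_nonneg hb.le).symm
    have hW0 : 0 < bpp.toNat := by omega
    have hchunks : ∀ (cs : List Int),
        cs.map (fun c =>
          (pvFormatBin ((max 0 (min (naa - 1) c)).toNat &&& ((1 <<< bpp.toNat) - 1)) bpp.toNat).reverse)
        = cs.map (fun c => pvChunkS bpp.toNat (max 0 (min (naa - 1) c))) := by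
      intro cs
      apply List.map_congr_left
      intro c _
      exact pv_chunk_eq bpp.toNat _ hW0 (le_max_left _ _)
    rcases hpre with h | h | h
    · omega
    · subst h
      have hnb : ¬ bpp ≤ 0 := by omega
      simp only [codes_to_bitstring_py, codes_to_bitstring_py_alt, PySem.List.enumerate_nil,
        List.foldl_nil, List.map_nil]
      rw [if_neg hnb]
      simp
    · have hL : (0 : Int) ≤ L := le_trans (Nat.cast_nonneg _) h
      have hLn : codes.length ≤ L.toNat := by omega
      have hcnt : (L * bpp).toNat = L.toNat * bpp.toNat := by
        conv_lhs => rw [show L * bpp = ((L.toNat * bpp.toNat : Nat) : Int) from by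
          rw [Int.natCast_mul, Int.toNat_of_nonneg hL, ← hbw]]
        rw [Int.toNat_natCast]
      have hout := pv_outer bpp naa hb codes 0 [] ((L * bpp).toNat)
        (by simp) (by rw [hcnt]; exact Nat.mul_le_mul_right _ hLn)
      simp only [Nat.cast_zero, List.nil_append] at hout
      have hpad : ((L - (codes.length : Int)) * bpp).toNat = (L * bpp).toNat - codes.length * bpp.toNat := by
        rw [hcnt]
        rw [show (L - (codes.length : Int)) * bpp = (((L.toNat - codes.length) * bpp.toNat : Nat) : Int) from by
          rw [Int.natCast_mul, Nat.cast_sub hLn, Int.toNat_of_nonneg hL, ← hbw]]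
        rw [Int.toNat_natCast, Nat.sub_mul]
      simp only [codes_to_bitstring_py, codes_to_bitstring_py_alt,
        if_neg (by omega : ¬ bpp ≤ 0)]
      rw [hout, hchunks, hpad]
      simp [List.flatten_append]

-- ===== VERDICT (by name: the statement is the Claim_ definition above) =====
theorem codes_to_bitstring_py_spec : Claim_unchanged_codes_to_bitstring_py := by
  intro codes L bpp naa _ hpre hnd
  exact pv_main codes L bpp naa hpre hnd

theorem codes_to_bitstring_py_changed : Claim_changed_codes_to_bitstring_py := by
  unfold Claim_changed_codes_to_bitstring_py; decide

theorem codes_to_bitstring_py_tight : Claim_exact_codes_to_bitstring_py := by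
  intro codes L bpp naa _ hpre hd
  obtain ⟨hbpp, hL⟩ := hd
  have hrange : PySem.List.pyRange 0 bpp 1 = [] := PySem.List.pyRange_one_eq_nil hbpp.le
  have hpos : 0 < (L * bpp).toNat := by
    have h := mul_pos_of_neg_of_neg hL hbpp
    generalize L * bpp = t at h ⊢
    omega
  simp only [codes_to_bitstring_py, codes_to_bitstring_py_alt, hrange, List.foldl_nil,
    if_pos hbpp.le, pv_foldl_id]
  intro heq
  have h2 := congrArg String.toList heq
  rw [String.toList_ofList] at h2
  have h3 := congrArg List.length h2
  simp at h3
  omega
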